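-- pv_equiv track=rewrite | github.com/phyeon/openh | openh/memdir.py | parse_frontmatter_quick
-- ===== SOURCE A (Python) =====
-- from typing import Literal
--
-- MemoryType = Literal["user", "feedback", "project", "reference"]
--
-- VALID_TYPES: tuple[MemoryType, ...] = ("user", "feedback", "project", "reference")
--
-- FRONTMATTER_MAX_LINES = 30
--
-- def _parse_memory_type(value: str) -> MemoryType | None:
--     normalized = (value or "").strip().lower()
--     if normalized in VALID_TYPES:
--         return normalized  # type: ignore[return-value]
--     return None
--
-- def parse_frontmatter_quick(
--     content: str,
-- ) -> tuple[str | None, str | None, MemoryType | None]: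
--     name = None
--     description = None
--     memory_type = None
--
--     lines = content.splitlines()[:FRONTMATTER_MAX_LINES]
--     if not lines or lines[0].strip() != "---":
--         return name, description, memory_type
--
--     for line in lines[1:]:
--         if line.strip() == "---":
--             break
--         if line.startswith("name:"):
--             name = line.partition(":")[2].strip().strip('"').strip("'")
--         elif line.startswith("description:"):
--             description = line.partition(":")[2].strip().strip('"').strip("'")
--         elif line.startswith("type:"):
--             memory_type = _parse_memory_type(
--                 line.partition(":")[2].strip().strip('"').strip("'")
--             )
--
--     return name, description, memory_type
-- ===== SOURCE B (Python) =====
-- FRONTMATTER_MAX_LINES = 30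
-- VALID_TYPES = ("user", "feedback", "project", "reference")
--
--
-- def _parse_memory_type(value):
--     normalized = (value or "").strip().lower()
--     if normalized in VALID_TYPES:
--         return normalized
--     return None
--
--
-- def parse_frontmatter_quick(content):
--     lines = content.splitlines()[:FRONTMATTER_MAX_LINES]
--     if not lines or lines[0].strip() != "---":
--         return None, None, None
--
--     body = lines[1:]
--     stop = next((i for i, line in enumerate(body) if line.strip() == "---"), len(body))
--
--     fields = {}
--     for line in body[:stop]:
--         key, sep, value = line.partition(":")
--         if sep:
--             fields[key] = value.strip().strip('"').strip("'")
--
--     name = fields.get("name")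
--     description = fields.get("description")
--     memory_type = _parse_memory_type(fields["type"]) if "type" in fields else None
--     return name, description, memory_type
-- ===== Notes on version B (the rewrite author's own statement) =====
-- stated objective: idiomatic
-- what changed: Replaces the break-driven if/elif chain mutating three variables with: find the index of the closing delimiter line, slice the body to it, build a last-wins fields dict from every colon-bearing line via str.partition, then read the three fields by dict lookup afterwards.
import Mathlib
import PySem

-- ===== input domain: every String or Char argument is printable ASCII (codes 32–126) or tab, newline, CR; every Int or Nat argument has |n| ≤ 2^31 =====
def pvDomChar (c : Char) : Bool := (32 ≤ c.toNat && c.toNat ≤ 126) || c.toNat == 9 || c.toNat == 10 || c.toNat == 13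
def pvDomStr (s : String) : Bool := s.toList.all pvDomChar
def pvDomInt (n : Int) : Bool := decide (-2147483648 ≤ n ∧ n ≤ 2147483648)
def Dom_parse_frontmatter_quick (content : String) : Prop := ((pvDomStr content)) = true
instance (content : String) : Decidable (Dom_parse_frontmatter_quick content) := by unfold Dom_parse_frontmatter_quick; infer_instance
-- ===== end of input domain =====

-- B replaces A's break-driven if/elif chain over three mutable variables by: find the closing-'---' index,
-- slice the body, build a last-wins fields dict from the 'key:value' lines, then read the fields by lookup (idiomatic; same cost).


-- shared helpers: both Pythons call str.partition(":"), the same value-cleaning chain and _parse_memory_type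

-- str.partition(":"): (part before the first ':', some (part after) — or none when there is no ':')
def splitColon : List Char → List Char × Option (List Char)
  | [] => ([], none)
  | c :: cs =>
    if c = ':' then ([], some cs)
    else
      let p := splitColon cs
      (c :: p.1, p.2)

-- value.strip().strip('"').strip("'")
def cleanVal (v : String) : String :=
  PySem.Str.stripChars (PySem.Str.stripChars (PySem.Str.strip v) "\"") "'"

-- _parse_memory_type
def parseMemoryType (value : String) : Option String :=
  let normalized := PySem.Str.lower (PySem.Str.strip value)
  if normalized = "user" ∨ normalized = "feedback" ∨ normalized = "project" ∨ normalized = "reference" then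
    some normalized
  else
    none

-- ===== PORT A =====
-- line.partition(":")[2]
def partAfter (l : String) : String := String.ofList (((splitColon l.toList).2).getD [])

-- A's for-loop with break, carrying (name, description, memory_type)
def loopA : List String → Option String × Option String × Option String → Option String × Option String × Option String
  | [], st => st
  | l :: rest, (n, d, t) =>
    if PySem.Str.strip l = "---" then (n, d, t)
    else if PySem.Str.startswith l "name:" then loopA rest (some (cleanVal (partAfter l)), d, t)
    else if PySem.Str.startswith l "description:" then loopA rest (n, some (cleanVal (partAfter l)), t)
    else if PySem.Str.startswith l "type:" then loopA rest (n, d, parseMemoryType (cleanVal (partAfter l)))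
    else loopA rest (n, d, t)

def parse_frontmatter_quick (content : String) : Option String × Option String × Option String :=
  let lines := PySem.List.slice (PySem.Str.splitlines content) none (some 30)
  match lines with
  | [] => (none, none, none)
  | l0 :: rest =>
    if PySem.Str.strip l0 = "---" then loopA rest (none, none, none)
    else (none, none, none)

-- ===== PORT B =====
-- next((i for i, line in enumerate(body) if line.strip() == "---"), len(body))
def stopIdx : List String → Nat
  | [] => 0
  | l :: rest => if PySem.Str.strip l = "---" then 0 else stopIdx rest + 1

-- one iteration of B's dict-building loop: key, sep, value = line.partition(":"); if sep: fields[key] = clean(value)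
def dictStep (fields : PySem.Dict String String) (l : String) : PySem.Dict String String :=
  match splitColon l.toList with
  | (key, some value) => fields.insert (String.ofList key) (cleanVal (String.ofList value))
  | (_, none) => fields

def parse_frontmatter_quick_alt (content : String) : Option String × Option String × Option String :=
  let lines := PySem.List.slice (PySem.Str.splitlines content) none (some 30)
  match lines with
  | [] => (none, none, none)
  | l0 :: body =>
    if PySem.Str.strip l0 = "---" then
      -- body[:stop] for a nonnegative in-range stop is List.take (exact)
      let fields := (body.take (stopIdx body)).foldl dictStep PySem.Dict.empty
      (fields.get? "name", fields.get? "description",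
        match fields.get? "type" with
        | some v => parseMemoryType v
        | none => none)
    else (none, none, none)

-- ===== PRECONDITION & SPEC =====
def Spec_parse_frontmatter_quick (content : String) (out : Option String × Option String × Option String) : Prop := out = parse_frontmatter_quick_alt content
instance (content : String) (out : Option String × Option String × Option String) : Decidable (Spec_parse_frontmatter_quick content out) := by unfold Spec_parse_frontmatter_quick; infer_instance

-- ===== CLAIM (what is proved, stated in full; the proofs are below) =====
def Claim_equal_parse_frontmatter_quick : Prop := ∀ (content : String), Dom_parse_frontmatter_quick content → Spec_parse_frontmatter_quick content (parse_frontmatter_quick content)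

-- ===== LEMMAS AND PROOFS =====

-- read B's three fields out of the dict
def toState (D : PySem.Dict String String) : Option String × Option String × Option String :=
  (D.get? "name", D.get? "description",
    match D.get? "type" with
    | some v => parseMemoryType v
    | none => none)

lemma splitColon_eq_some {cs b a : List Char} (h : splitColon cs = (b, some a)) :
    cs = b ++ ':' :: a := by
  induction cs generalizing b with
  | nil => simp [splitColon] at h
  | cons c cs ih =>
    by_cases hc : c = ':'
    · simp [splitColon, hc] at h
      simp [hc, h.1, h.2]
    · rcases hsc : splitColon cs with ⟨b1, o1⟩
      simp [splitColon, hc, hsc] at h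
      rw [← h.1, ih (by rw [hsc, h.2])]
      simp

lemma splitColon_prefix {cs t k : List Char} (hk : ':' ∉ k) (h : cs = (k ++ [':']) ++ t) :
    splitColon cs = (k, some t) := by
  subst h
  induction k with
  | nil => simp [splitColon]
  | cons c k ih =>
    have hc : c ≠ ':' := by intro hc; exact hk (by simp [hc])
    have hk' : ':' ∉ k := fun h' => hk (by simp [h'])
    have ih' := ih hk'
    simp only [List.append_assoc, List.singleton_append] at ih' ⊢
    simp [splitColon, hc, ih']

lemma sw_iff (l : String) (k : List Char) (hk : ':' ∉ k) :
    PySem.Chars.startswith l.toList (k ++ [':']) = true ↔ ∃ a, splitColon l.toList = (k, some a) := by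
  rw [PySem.Chars.startswith_iff]
  constructor
  · rintro ⟨t, ht⟩
    exact ⟨t, splitColon_prefix hk ht.symm⟩
  · rintro ⟨a, ha⟩
    exact ⟨a, by rw [splitColon_eq_some ha]; simp⟩

-- the per-line step: A's if/elif update of the state equals B's dict insert, through toState
lemma step_eq (l : String) (D : PySem.Dict String String) :
    (if PySem.Str.startswith l "name:" then
        (some (cleanVal (partAfter l)), D.get? "description",
          match D.get? "type" with | some v => parseMemoryType v | none => none)
      else if PySem.Str.startswith l "description:" then
        (D.get? "name", some (cleanVal (partAfter l)),
          match D.get? "type" with | some v => parseMemoryType v | none => none)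
      else if PySem.Str.startswith l "type:" then
        (D.get? "name", D.get? "description", parseMemoryType (cleanVal (partAfter l)))
      else toState D) = toState (dictStep D l) := by
  have hconv : ∀ (pat : String) (k : List Char), pat.toList = k ++ [':'] → ':' ∉ k →
      (PySem.Str.startswith l pat = true ↔ ∃ a, splitColon l.toList = (k, some a)) := by
    intro pat k hpat hk
    rw [show PySem.Str.startswith l pat = PySem.Chars.startswith l.toList pat.toList from by simp,
        hpat, sw_iff l k hk]
  by_cases h1 : PySem.Str.startswith l "name:" = true
  · obtain ⟨a, ha⟩ := (hconv "name:" "name".toList rfl (by decide)).1 h1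
    rw [if_pos h1]
    unfold toState dictStep partAfter
    rw [ha]
    simp [PySem.Dict.get?_insert]
  · by_cases h2 : PySem.Str.startswith l "description:" = true
    · obtain ⟨a, ha⟩ := (hconv "description:" "description".toList rfl (by decide)).1 h2
      rw [if_neg h1, if_pos h2]
      unfold toState dictStep partAfter
      rw [ha]
      simp [PySem.Dict.get?_insert]
    · by_cases h3 : PySem.Str.startswith l "type:" = true
      · obtain ⟨a, ha⟩ := (hconv "type:" "type".toList rfl (by decide)).1 h3
        rw [if_neg h1, if_neg h2, if_pos h3]
        unfold toState dictStep partAfter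
        rw [ha]
        simp [PySem.Dict.get?_insert]
      · rw [if_neg h1, if_neg h2, if_neg h3]
        rcases hsc : splitColon l.toList with ⟨b, _ | a⟩
        · unfold toState dictStep
          rw [hsc]
        · have hne : ∀ (pat : String) (k : List Char), pat.toList = k ++ [':'] → ':' ∉ k →
              PySem.Str.startswith l pat ≠ true → (k : List Char) ≠ b := by
            intro pat k hpat hk hsw hkb
            exact hsw ((hconv pat k hpat hk).2 ⟨a, by rw [hkb]; exact hsc⟩)
          have hn := hne "name:" "name".toList rfl (by decide) h1
          have hd := hne "description:" "description".toList rfl (by decide) h2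
          have ht := hne "type:" "type".toList rfl (by decide) h3
          have key_ne : ∀ s : String, s.toList ≠ b → s ≠ String.ofList b := by
            intro s hs heq
            exact hs (by rw [heq]; simp)
          unfold toState dictStep
          rw [hsc]
          simp only [PySem.Dict.get?_insert_of_ne _ _ (key_ne "name" hn),
            PySem.Dict.get?_insert_of_ne _ _ (key_ne "description" hd),
            PySem.Dict.get?_insert_of_ne _ _ (key_ne "type" ht)]

lemma main_loop (ls : List String) (D : PySem.Dict String String) :
    loopA ls (toState D) = toState ((ls.take (stopIdx ls)).foldl dictStep D) := by
  induction ls generalizing D with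
  | nil => simp [loopA, stopIdx]
  | cons l rest ih =>
    by_cases hdash : PySem.Str.strip l = "---"
    · simp [loopA, stopIdx, hdash, toState]
    · rw [stopIdx]
      simp only [if_neg hdash, List.take_succ_cons, List.foldl_cons]
      rw [← ih (dictStep D l), ← step_eq l D]
      simp only [toState, loopA, if_neg hdash]
      split_ifs <;> rfl

lemma toState_empty : toState PySem.Dict.empty = (none, none, none) := by
  simp [toState, PySem.Dict.get?_empty]

-- ===== VERDICT (by name: the statement is the Claim_ definition above) =====
theorem parse_frontmatter_quick_spec : Claim_equal_parse_frontmatter_quick := by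
  intro content _
  unfold Spec_parse_frontmatter_quick parse_frontmatter_quick parse_frontmatter_quick_alt
  rcases PySem.List.slice (PySem.Str.splitlines content) none (some 30) with _ | ⟨l0, rest⟩
  · rfl
  · simp only
    split_ifs with h
    · rw [← toState_empty, main_loop]
      rfl
    · rfl
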